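-- pv_equiv track=rewrite | github.com/zipkortnicks57/romakan | src/romakan/mora.py | get_moras
-- ===== SOURCE A (Python) =====
-- def get_moras(word: str):
--     """
--     Get moras list from
--     """
--     glas = ["a", "i", "u", "e", "o"]
--     moras = []
--     indx = 0
--     mora = ""
--     while indx < len(word):
--         if mora == "n" and word[indx] not in glas:
--             moras.append(mora)
--             mora = word[indx]
--         else:
--             mora += word[indx]
--         if mora[-1] in glas:
--             moras.append(mora)
--             mora = ""
--         indx += 1
--     if mora != "":
--         moras.append(mora)
--     return moras
-- ===== SOURCE B (Python) =====
-- def get_moras(word: str):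
--     """
--     Get moras list from
--     """
--     vowels = "aiueo"
--     n = len(word)
--     moras = []
--     i = 0
--     while i < n:
--         if word[i] == "n" and (i + 1 == n or word[i + 1] not in vowels):
--             # a lone "n" at the start of a token is its own mora
--             moras.append("n")
--             i += 1
--         else:
--             # scan the consonant cluster, then take the vowel that ends it (if any)
--             j = i
--             while j < n and word[j] not in vowels:
--                 j += 1
--             if j < n:
--                 j += 1
--             moras.append(word[i:j])
--             i = j
--     return moras
-- ===== Notes on version B (the rewrite author's own statement) =====
-- stated objective: alternative
-- what changed: Replaced A's per-character state machine with a mutable pending-mora accumulator and flush conditions by a token-at-a-time scanner that at each position either emits a lone 'n' (when not followed by a vowel) or scans the whole consonant cluster plus its closing vowel in one inner loop and slices it out.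
import Mathlib
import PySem

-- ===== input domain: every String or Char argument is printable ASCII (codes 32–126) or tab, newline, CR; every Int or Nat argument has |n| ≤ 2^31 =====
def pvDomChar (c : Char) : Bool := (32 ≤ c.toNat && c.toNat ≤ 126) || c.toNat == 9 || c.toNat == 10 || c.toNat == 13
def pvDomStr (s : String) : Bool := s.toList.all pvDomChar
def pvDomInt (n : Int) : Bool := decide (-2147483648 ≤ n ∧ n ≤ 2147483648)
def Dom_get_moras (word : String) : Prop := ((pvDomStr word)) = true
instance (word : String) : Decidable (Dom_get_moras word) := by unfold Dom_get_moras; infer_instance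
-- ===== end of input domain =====

-- B replaces A's per-character state machine (mutable `mora` accumulator) by a
-- token-at-a-time scanner (lone-n rule, else consonant cluster + optional vowel);
-- objective: alternative decomposition, same cost.

-- ===== PORT A =====
-- `word[indx] in glas` / `mora[-1] in glas`
def pvVowel (c : Char) : Bool := c = 'a' || c = 'i' || c = 'u' || c = 'e' || c = 'o'

-- the while loop of A: state = (remaining chars, mora, moras)
def goA : List Char → List Char → List String → List String
  | [], mora, moras => if mora ≠ [] then moras ++ [String.mk mora] else moras
  | c :: rest, mora, moras =>
    -- if mora == "n" and word[indx] not in glas: flush "n", mora = word[indx]; else mora += word[indx]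
    let st : List Char × List String :=
      if mora = ['n'] ∧ pvVowel c = false then ([c], moras ++ [String.mk mora])
      else (mora ++ [c], moras)
    -- if mora[-1] in glas (mora is nonempty here; Python would raise on "")
    if st.1.getLast?.elim false pvVowel then goA rest [] (st.2 ++ [String.mk st.1])
    else goA rest st.1 st.2

def get_moras (word : String) : List String := goA word.toList [] []

-- ===== PORT B =====
-- inner `while j < n and word[j] not in vowels: j += 1` of Source B:
-- splits off the maximal non-vowel prefix
def pvSpanNV : List Char → List Char × List Char
  | [] => ([], [])
  | c :: rest =>
    if pvVowel c then ([], c :: rest)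
    else
      let p := pvSpanNV rest
      (c :: p.1, p.2)

theorem pvSpanNV_snd_length (s : List Char) : (pvSpanNV s).2.length ≤ s.length := by
  induction s with
  | nil => simp [pvSpanNV]
  | cons c rest ih =>
    simp only [pvSpanNV]
    split <;> simp <;> omega

-- the outer while loop of Source B: each iteration emits one mora and advances
def goB : List Char → List String
  | [] => []
  | c :: rest =>
    if c = 'n' ∧ (match rest with | [] => true | c2 :: _ => !pvVowel c2) = true then
      "n" :: goB rest
    else
      -- word[i:j] : the non-vowel cluster, plus the closing vowel if j < n
      let t := (pvSpanNV (c :: rest)).1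
      let u := (pvSpanNV (c :: rest)).2
      if hu : u = [] then [String.mk t]
      else String.mk (t ++ [u.head hu]) :: goB u.tail
  termination_by s => s.length
  decreasing_by
  · simp
  · have h1 := pvSpanNV_snd_length (c :: rest)
    have h2 : u.length ≥ 1 := List.length_pos_iff.mpr hu
    have h3 : u.tail.length = u.length - 1 := List.length_tail
    simp at h1 ⊢
    omega

def get_moras_alt (word : String) : List String := goB word.toList

-- ===== PRECONDITION & SPEC =====
def Spec_get_moras (word : String) (out : List String) : Prop := out = get_moras_alt word
instance (word : String) (out : List String) : Decidable (Spec_get_moras word out) := by unfold Spec_get_moras; infer_instance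

-- ===== CLAIM (what is proved, stated in full; the proofs are below) =====
def Claim_equal_get_moras : Prop := ∀ (word : String), Dom_get_moras word → Spec_get_moras word (get_moras word)

-- ===== LEMMAS AND PROOFS =====

-- continuation of B after a partial non-vowel cluster p has been read
def clusterCont (p : List Char) (chars : List Char) : List String :=
  match pvSpanNV chars with
  | (t, []) => [String.mk (p ++ t)]
  | (t, v :: r) => String.mk (p ++ t ++ [v]) :: goB r

-- what goB's generalized pending state computes
theorem mk_n : String.mk ['n'] = "n" := by decide

def pend (p : List Char) (chars : List Char) : List String :=
  if p = [] then goB chars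
  else if p = ['n'] then goB ('n' :: chars)
  else clusterCont p chars

theorem pend_nil (chars : List Char) : pend [] chars = goB chars := by simp [pend]

theorem pend_n (chars : List Char) : pend ['n'] chars = goB ('n' :: chars) := by simp [pend]

theorem pend_cluster (p chars : List Char) (h0 : p ≠ []) (h1 : p ≠ ['n']) :
    pend p chars = clusterCont p chars := by simp [pend, h0, h1]

theorem goB_nil : goB [] = [] := by simp [goB]

theorem goB_cons (c : Char) (rest : List Char) :
    goB (c :: rest) =
      if c = 'n' ∧ (match rest with | [] => true | c2 :: _ => !pvVowel c2) = true then
        "n" :: goB rest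
      else
        let t := (pvSpanNV (c :: rest)).1
        let u := (pvSpanNV (c :: rest)).2
        if hu : u = [] then [String.mk t]
        else String.mk (t ++ [u.head hu]) :: goB u.tail := by
  rw [goB.eq_def]

theorem goB_else (c : Char) (rest : List Char)
    (hc : ¬ (c = 'n' ∧ (match rest with | [] => true | c2 :: _ => !pvVowel c2) = true)) :
    goB (c :: rest) = clusterCont [] (c :: rest) := by
  rw [goB_cons, if_neg hc]
  simp only [clusterCont]
  rcases h : pvSpanNV (c :: rest) with ⟨t, u⟩
  rcases u with _ | ⟨v, r⟩ <;> simp [h]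

theorem clusterCont_cons (c : Char) (rest : List Char) (hv : pvVowel c = false) :
    clusterCont [] (c :: rest) = clusterCont [c] rest := by
  simp only [clusterCont, pvSpanNV, hv, Bool.false_eq_true, if_false]
  rcases h : pvSpanNV rest with ⟨t, u⟩
  rcases u with _ | ⟨v, r⟩ <;> simp

theorem goB_cluster (c : Char) (rest : List Char)
    (hv : pvVowel c = false) (hn : c ≠ 'n') :
    goB (c :: rest) = clusterCont [c] rest := by
  rw [goB_else c rest (by simp [hn]), clusterCont_cons c rest hv]

theorem pend_single (c : Char) (rest : List Char) (hv : pvVowel c = false) :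
    pend [c] rest = goB (c :: rest) := by
  by_cases hcn : c = 'n'
  · subst hcn; exact pend_n rest
  · rw [pend_cluster [c] rest (by simp) (by simp [hcn]), goB_cluster c rest hv hcn]

theorem goA_pend : ∀ (chars p : List Char) (acc : List String),
    (∀ x ∈ p, pvVowel x = false) →
    goA chars p acc = acc ++ pend p chars := by
  intro chars
  induction chars with
  | nil =>
    intro p acc hp
    by_cases h0 : p = []
    · subst h0; simp [goA, pend_nil, goB_nil]
    by_cases h1 : p = ['n']
    · subst h1
      rw [pend_n, goB_cons, if_pos (by simp)]
      simp [goA, goB_nil, mk_n]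
    · rw [pend_cluster p [] h0 h1]
      simp [goA, h0, clusterCont, pvSpanNV]
  | cons c rest ih =>
    intro p acc hp
    by_cases h0 : p = []
    · subst h0
      rw [pend_nil]
      by_cases hv : pvVowel c = true
      · -- vowel: flush the one-char mora [c]
        have hstep : goA (c :: rest) [] acc = goA rest [] (acc ++ [String.mk [c]]) := by
          simp [goA, hv]
        have hcn : c ≠ 'n' := by intro h; subst h; simp [pvVowel] at hv
        rw [hstep, ih [] _ (by simp), pend_nil, goB_else c rest (by simp [hcn])]
        simp [clusterCont, pvSpanNV, hv]
      · have hv' : pvVowel c = false := by simpa using hv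
        have hstep : goA (c :: rest) [] acc = goA rest [c] acc := by
          simp [goA, hv']
        rw [hstep, ih [c] _ (by simp [hv']), pend_single c rest hv']
    by_cases h1 : p = ['n']
    · subst h1
      rw [pend_n]
      by_cases hv : pvVowel c = true
      · -- vowel after lone n: mora = "n"+c, flush it
        have hstep : goA (c :: rest) ['n'] acc = goA rest [] (acc ++ [String.mk ['n', c]]) := by
          simp [goA, hv]
        rw [hstep, ih [] _ (by simp), pend_nil,
          goB_else 'n' (c :: rest) (by simp [hv])]
        have hnv : pvVowel 'n' = false := by decide
        simp [clusterCont, pvSpanNV, hnv, hv]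
      · have hv' : pvVowel c = false := by simpa using hv
        -- split: emit "n", start a new mora [c]
        have hstep : goA (c :: rest) ['n'] acc = goA rest [c] (acc ++ [String.mk ['n']]) := by
          simp [goA, hv']
        have hlone : goB ('n' :: c :: rest) = "n" :: goB (c :: rest) := by
          rw [goB_cons, if_pos (by simp [hv'])]
        rw [hstep, ih [c] _ (by simp [hv']), pend_single c rest hv', hlone]
        simp [mk_n]
    · -- p is a cluster of length ≥ 1, not ["n"]: mora grows or flushes
      rw [pend_cluster p _ h0 h1]
      by_cases hv : pvVowel c = true
      · have hstep : goA (c :: rest) p acc = goA rest [] (acc ++ [String.mk (p ++ [c])]) := by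
          simp [goA, h1, hv]
        rw [hstep, ih [] _ (by simp), pend_nil]
        simp [clusterCont, pvSpanNV, hv]
      · have hvf : pvVowel c = false := by simpa using hv
        have hstep : goA (c :: rest) p acc = goA rest (p ++ [c]) acc := by
          simp [goA, h1, hvf]
        have hlen : (p ++ [c]).length ≥ 2 := by
          have : p.length ≥ 1 := List.length_pos_iff.mpr h0
          simp; omega
        rw [hstep, ih (p ++ [c]) _ (by
            intro x hx
            rcases List.mem_append.1 hx with h | h
            · exact hp x h
            · simp at h; subst h; exact hvf),
          pend_cluster (p ++ [c]) rest (by simp)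
            (by intro h; rw [h] at hlen; simp at hlen)]
        simp only [clusterCont, pvSpanNV, hvf, Bool.false_eq_true, if_false]
        rcases h : pvSpanNV rest with ⟨t, u⟩
        rcases u with _ | ⟨v, r⟩ <;> simp

-- ===== VERDICT (by name: the statement is the Claim_ definition above) =====
theorem get_moras_spec : Claim_equal_get_moras := by
  intro word _
  show get_moras word = get_moras_alt word
  unfold get_moras get_moras_alt
  rw [goA_pend word.toList [] [] (by simp)]
  simp [pend]
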